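-- pv_equiv track=rewrite | github.com/jaynerd/ArionScraper | src/Spider.py | sort_entries
-- ===== SOURCE A (Python) =====
-- def sort_entries(entries):
--     dictionary = {}
--     counter = 0
--     for i in range(0, int(len(entries) / 2)):
--         dictionary.setdefault(entries[(counter + 1)], [])
--         temp_list = dictionary[entries[(counter + 1)]]
--         if entries[counter] not in temp_list:
--             dictionary[entries[(counter + 1)]].append(entries[counter])
--         counter += 2
--     return dictionary
-- ===== SOURCE B (Python) =====
-- def sort_entries(entries):
--     # Pass 1: group values under their keys (duplicates kept).
--     groups = {}
--     for value, key in zip(entries[0::2], entries[1::2]):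
--         groups.setdefault(key, []).append(value)
--     # Pass 2: dedup each bucket, preserving first-seen order.
--     return {key: list(dict.fromkeys(values)) for key, values in groups.items()}
-- ===== Notes on version B (the rewrite author's own statement) =====
-- stated objective: simpler
-- what changed: A's single interleaved loop (manual counter, index arithmetic, per-pair membership test before each append) is replaced by two separately shaped passes: a grouping pass over zip(entries[0::2], entries[1::2]) that appends every value, then a per-bucket ordered dedup via dict.fromkeys.
import Mathlib
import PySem

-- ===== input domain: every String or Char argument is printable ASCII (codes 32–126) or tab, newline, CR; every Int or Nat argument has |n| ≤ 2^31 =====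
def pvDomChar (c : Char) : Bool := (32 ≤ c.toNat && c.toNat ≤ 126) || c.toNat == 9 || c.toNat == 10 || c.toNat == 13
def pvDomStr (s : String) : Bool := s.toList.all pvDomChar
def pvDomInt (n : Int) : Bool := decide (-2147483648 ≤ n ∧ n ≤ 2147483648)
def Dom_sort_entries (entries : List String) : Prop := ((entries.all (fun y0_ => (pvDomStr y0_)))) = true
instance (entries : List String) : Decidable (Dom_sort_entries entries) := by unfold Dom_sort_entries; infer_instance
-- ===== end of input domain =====

-- B replaces A's single interleaved counter loop by two separately shaped passes (group every
-- value under its key, then dedup each bucket in first-seen order); objective: simpler.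

-- ===== PORT A =====
-- Literal port of A's counter loop. entries[counter] / entries[counter + 1] are always in range
-- (counter + 1 = 2*i + 1 < len), so pyGetD's default is never reached; int(len(entries)/2) is
-- ported as Nat division, exact for these non-negative lengths.
def sort_entries (entries : List String) : List (String × List String) :=
  (((PySem.List.pyRange 0 ((entries.length / 2 : Nat) : Int) 1).foldl
    (fun (st : PySem.Dict String (List String) × Int) (_i : Int) =>
      let dictionary := st.1.setdefault (PySem.List.pyGetD entries (st.2 + 1) "") []
      let temp_list := dictionary.getD (PySem.List.pyGetD entries (st.2 + 1) "") []
      let dictionary :=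
        if temp_list.contains (PySem.List.pyGetD entries st.2 "") then dictionary
        else dictionary.insert (PySem.List.pyGetD entries (st.2 + 1) "")
               (temp_list ++ [PySem.List.pyGetD entries st.2 ""])
      (dictionary, st.2 + 2))
    (PySem.Dict.empty, 0)).1).items

-- ===== PORT B =====
-- Hand port of the extended slices entries[0::2] / entries[1::2] (every second element starting
-- at the head of the given list): exact by structural recursion.
def pvEveryOther {α : Type} : List α → List α
  | [] => []
  | [a] => [a]
  | a :: _ :: rest => a :: pvEveryOther rest

def sort_entries_alt (entries : List String) : List (String × List String) :=
  let groups := (List.zip (pvEveryOther entries) (pvEveryOther entries.tail)).foldl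
    (fun (g : PySem.Dict String (List String)) (p : String × String) =>
      g.modify p.2 [] (· ++ [p.1]))
    PySem.Dict.empty
  groups.items.map (fun p => (p.1, PySem.List.dedup p.2))

-- ===== PRECONDITION & SPEC =====
def Spec_sort_entries (entries : List String) (out : List (String × List String)) : Prop := out = sort_entries_alt entries
instance (entries : List String) (out : List (String × List String)) : Decidable (Spec_sort_entries entries out) := by unfold Spec_sort_entries; infer_instance

-- ===== CLAIM (what is proved, stated in full; the proofs are below) =====
def Claim_equal_sort_entries : Prop := ∀ (entries : List String), Dom_sort_entries entries → Spec_sort_entries entries (sort_entries entries)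

-- ===== LEMMAS AND PROOFS =====

-- Names for the two loop bodies, the pair stream, and the per-bucket dedup (definitionally
-- those appearing in the ports).
def pvStepA (d : PySem.Dict String (List String)) (p : String × String) :
    PySem.Dict String (List String) :=
  let d1 := d.setdefault p.2 []
  let t := d1.getD p.2 []
  if t.contains p.1 then d1 else d1.insert p.2 (t ++ [p.1])

def pvStepB (d : PySem.Dict String (List String)) (p : String × String) :
    PySem.Dict String (List String) :=
  d.modify p.2 [] (· ++ [p.1])

def pvPairs (xs : List String) : List (String × String) :=
  List.zip (pvEveryOther xs) (pvEveryOther xs.tail)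

def pvF (p : String × List String) : String × List String := (p.1, PySem.List.dedup p.2)

def pvDedupD (d : PySem.Dict String (List String)) : PySem.Dict String (List String) :=
  PySem.Dict.mk (d.items.map pvF)

theorem pvEveryOther_tail_cons (b : String) (r : List String) :
    pvEveryOther (b :: r) = b :: pvEveryOther r.tail := by
  cases r <;> rfl

theorem pvPairs_cons₂ (a b : String) (r : List String) :
    pvPairs (a :: b :: r) = (a, b) :: pvPairs r := by
  unfold pvPairs
  simp [pvEveryOther, pvEveryOther_tail_cons]

theorem pvPairs_short (xs : List String) (h : xs.length ≤ 1) : pvPairs xs = [] := by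
  match xs, h with
  | [], _ => rfl
  | [a], _ => rfl

theorem pvDedupD_empty : pvDedupD PySem.Dict.empty = PySem.Dict.empty := rfl

theorem contains_pvDedupD (d : PySem.Dict String (List String)) (k : String) :
    (pvDedupD d).contains k = d.contains k := by
  obtain ⟨l⟩ := d
  show (l.map pvF).any (fun p => p.1 == k) = l.any (fun p => p.1 == k)
  simp only [List.any_map]
  congr 1

theorem get?_pvDedupD (d : PySem.Dict String (List String)) (k : String) :
    (pvDedupD d).get? k = (d.get? k).map PySem.List.dedup := by
  obtain ⟨l⟩ := d
  induction l with
  | nil => rfl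
  | cons p rest ih =>
    show (PySem.Dict.mk ((p.1, PySem.List.dedup p.2) :: rest.map pvF)).get? k = _
    rw [PySem.Dict.get?_mk_cons, PySem.Dict.get?_mk_cons]
    split
    · rfl
    · exact ih

theorem getD_pvDedupD (d : PySem.Dict String (List String)) (k : String) :
    (pvDedupD d).getD k [] = PySem.List.dedup (d.getD k []) := by
  rcases h : d.get? k with _ | vs <;>
    simp [PySem.Dict.getD_eq_get?_getD, get?_pvDedupD, h, PySem.List.dedup]

theorem pvStepA_dedup (d : PySem.Dict String (List String)) (p : String × String)
    (hnd : d.keys.Nodup) : pvStepA (pvDedupD d) p = pvDedupD (pvStepB d p) := by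
  obtain ⟨v, k⟩ := p
  have hmod : pvStepB d (v, k) = d.insert k (d.getD k [] ++ [v]) := rfl
  cases hcon : d.contains k with
  | false =>
    have hcon' : (pvDedupD d).contains k = false := by rw [contains_pvDedupD, hcon]
    have hgd : d.getD k [] = [] := PySem.Dict.getD_of_not_contains d [] hcon
    rw [hmod, hgd]
    show (if (((pvDedupD d).setdefault k []).getD k []).contains v = true then _ else _) = _
    rw [PySem.Dict.setdefault_of_not_contains (pvDedupD d) [] hcon']
    rw [PySem.Dict.getD_insert_self]
    show ((pvDedupD d).insert k []).insert k ([] ++ [v]) = _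
    rw [PySem.Dict.insert_insert_self]
    apply PySem.Dict.ext
    rw [PySem.Dict.items_insert_of_not_contains _ _ hcon']
    show _ = (d.insert k ([] ++ [v])).items.map pvF
    rw [PySem.Dict.items_insert_of_not_contains _ _ hcon]
    simp only [List.map_append, List.nil_append]
    show (pvDedupD d).items ++ [(k, [v])] = (pvDedupD d).items ++ [pvF (k, [v])]
    rfl
  | true =>
    have hcon' : (pvDedupD d).contains k = true := by rw [contains_pvDedupD, hcon]
    set vs := d.getD k [] with hvs
    rw [hmod]
    show (if (((pvDedupD d).setdefault k []).getD k []).contains v = true then _ else _) = _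
    rw [PySem.Dict.setdefault_of_contains (pvDedupD d) [] hcon', getD_pvDedupD, ← hvs]
    have hB : (pvDedupD (d.insert k (vs ++ [v]))).items
        = d.items.map (fun q => if q.1 == k then (k, PySem.List.dedup (vs ++ [v])) else pvF q) := by
      show (d.insert k (vs ++ [v])).items.map pvF = _
      rw [PySem.Dict.items_insert_of_contains _ _ hcon, List.map_map]
      apply List.map_congr_left
      intro q _
      by_cases hk : q.1 = k
      · simp [Function.comp, hk, pvF]
      · simp [Function.comp, hk, pvF]
    have hded : PySem.List.dedup (vs ++ [v])
        = if (PySem.List.dedup vs).contains v then PySem.List.dedup vs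
          else PySem.List.dedup vs ++ [v] := by
      simp only [PySem.List.dedup_eq_ofList, PySem.Set.ofList_append_singleton]
      rfl
    cases hv : (PySem.List.dedup vs).contains v with
    | true =>
      simp only [if_true]
      apply PySem.Dict.ext
      rw [hB]
      show d.items.map pvF = _
      apply List.map_congr_left
      intro q hq
      by_cases hk : q.1 = k
      · have hq2 : d.getD q.1 [] = q.2 := PySem.Dict.getD_of_mem_items d hq hnd []
        have hveq : vs = q.2 := by rw [hvs, ← hk, hq2]
        simp only [hded, hv, if_true]
        simp [pvF, hk, ← hveq]
      · simp [pvF, hk]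
    | false =>
      apply PySem.Dict.ext
      rw [hB]
      show ((pvDedupD d).insert k (PySem.List.dedup vs ++ [v])).items = _
      rw [PySem.Dict.items_insert_of_contains _ _ hcon']
      show (d.items.map pvF).map _ = _
      rw [List.map_map]
      apply List.map_congr_left
      intro q hq
      by_cases hk : q.1 = k
      · have hq2 : d.getD q.1 [] = q.2 := PySem.Dict.getD_of_mem_items d hq hnd []
        have hveq : vs = q.2 := by rw [hvs, ← hk, hq2]
        simp only [hded, hv]
        simp [Function.comp, pvF, hk, ← hveq]
      · simp [Function.comp, pvF, hk]

theorem pvFold_dedup (pr : List (String × String)) (d : PySem.Dict String (List String))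
    (hnd : d.keys.Nodup) :
    pr.foldl pvStepA (pvDedupD d) = pvDedupD (pr.foldl pvStepB d) := by
  induction pr generalizing d with
  | nil => rfl
  | cons p pr ih =>
    simp only [List.foldl_cons, pvStepA_dedup d p hnd]
    exact ih _ (by
      show ((d.modify p.2 [] (· ++ [p.1])).keys).Nodup
      exact PySem.Dict.nodup_keys_insert d p.2 _ hnd)

-- A's loop body as a function of the state alone (the body ignores the range element).
def pvG (entries : List String) (st : PySem.Dict String (List String) × Int) :
    PySem.Dict String (List String) × Int :=
  let dictionary := st.1.setdefault (PySem.List.pyGetD entries (st.2 + 1) "") []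
  let temp_list := dictionary.getD (PySem.List.pyGetD entries (st.2 + 1) "") []
  let dictionary :=
    if temp_list.contains (PySem.List.pyGetD entries st.2 "") then dictionary
    else dictionary.insert (PySem.List.pyGetD entries (st.2 + 1) "")
           (temp_list ++ [PySem.List.pyGetD entries st.2 ""])
  (dictionary, st.2 + 2)

theorem pvFoldl_ignore_arg {α β : Type} (l : List α) (g : β → β) (init : β) :
    l.foldl (fun s _ => g s) init = g^[l.length] init := by
  induction l generalizing init with
  | nil => rfl
  | cons x xs ih => simp [List.foldl_cons, ih, Function.iterate_succ_apply]

theorem pvIter_pairs (entries : List String) :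
    ∀ (k c : Nat) (d : PySem.Dict String (List String)),
      c + 2 * k ≤ entries.length → entries.length ≤ c + 2 * k + 1 →
      (pvG entries)^[k] (d, (c : Int)) =
        ((pvPairs (entries.drop c)).foldl pvStepA d, ((c + 2 * k : Nat) : Int)) := by
  intro k
  induction k with
  | zero =>
    intro c d h1 h2
    rw [pvPairs_short _ (by simp; omega)]
    simp
  | succ k ih =>
    intro c d h1 h2
    have hc1 : c + 1 < entries.length := by omega
    have hc : c < entries.length := by omega
    have hdrop : entries.drop c = entries[c] :: entries[c + 1] :: entries.drop (c + 2) := by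
      rw [List.drop_eq_getElem_cons hc, List.drop_eq_getElem_cons hc1]
    rw [Function.iterate_succ_apply]
    have hg : pvG entries (d, (c : Int)) =
        (pvStepA d (entries[c], entries[c + 1]), ((c + 2 : Nat) : Int)) := by
      have e1 : ((c : Int) + 1) = ((c + 1 : Nat) : Int) := by push_cast; ring
      have e2 : ((c : Int) + 2) = ((c + 2 : Nat) : Int) := by push_cast; ring
      simp only [pvG, pvStepA, e1, e2, PySem.List.pyGetD_natCast]
      rw [List.getD_eq_getElem entries "" hc, List.getD_eq_getElem entries "" hc1]
    rw [hg, ih (c + 2) _ (by omega) (by omega), hdrop, pvPairs_cons₂]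
    simp only [List.foldl_cons]
    congr 2
    omega

theorem sort_entries_eq_pairs_fold (entries : List String) :
    sort_entries entries = ((pvPairs entries).foldl pvStepA PySem.Dict.empty).items := by
  have hlen : (PySem.List.pyRange 0 ((entries.length / 2 : Nat) : Int) 1).length
      = entries.length / 2 := by
    simp
    omega
  have h := pvIter_pairs entries (entries.length / 2) 0 PySem.Dict.empty (by omega) (by omega)
  simp only [List.drop_zero, Nat.cast_zero] at h
  show (((PySem.List.pyRange 0 ((entries.length / 2 : Nat) : Int) 1).foldl
      (fun st _ => pvG entries st) (PySem.Dict.empty, 0)).1).items = _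
  rw [pvFoldl_ignore_arg, hlen, h]

theorem sort_entries_eq_alt (entries : List String) :
    sort_entries entries = sort_entries_alt entries := by
  rw [sort_entries_eq_pairs_fold]
  have h := pvFold_dedup (pvPairs entries) PySem.Dict.empty (by
    show (PySem.Dict.empty : PySem.Dict String (List String)).keys.Nodup
    simp [PySem.Dict.keys_empty])
  rw [pvDedupD_empty] at h
  rw [h]
  rfl

-- ===== VERDICT (by name: the statement is the Claim_ definition above) =====
theorem sort_entries_spec : Claim_equal_sort_entries := by
  intro entries _
  unfold Spec_sort_entries
  exact sort_entries_eq_alt entries
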